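-- pv_equiv track=rewrite | github.com/AikawaShota/web-toolbox | toolbox/filler_text/text.py | text_length
-- ===== SOURCE A (Python) =====
-- def text_length(text, count):
--     if len(text) >= count:
--         return text[:count]
--     else:
--         for i in range(count):
--             if len(text) > count:
--                 text = text[:len(text)-(len(text)-count)]
--                 break
--             text = text + text
--         return text
-- ===== SOURCE B (Python) =====
-- def text_length(text, count):
--     # Closed form instead of A's doubling loop: repeat the text enough times, then truncate.
--     if len(text) >= count:
--         return text[:count]
--     if not text:
--         return ""
--     reps = count // len(text) + 1
--     return (text * reps)[:count]
-- ===== Notes on version B (the rewrite author's own statement) =====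
-- stated objective: simpler
-- what changed: Replaces A's iterative doubling loop (repeatedly text = text + text until long enough, then truncate) with a closed-form string multiplication (text * (count//len(text)+1))[:count], guarded for the empty-text case.
-- intended difference: On a one-character text with count == 2, A's doubling loop exhausts range(2) without ever triggering the truncation guard and returns the text repeated 4 times (length 4); B returns the text repeated twice (length 2), which is the intended result of filling to exactly count characters. — e.g. on text_length("a", 2): A returns "aaaa", B returns "aa"
import Mathlib
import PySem

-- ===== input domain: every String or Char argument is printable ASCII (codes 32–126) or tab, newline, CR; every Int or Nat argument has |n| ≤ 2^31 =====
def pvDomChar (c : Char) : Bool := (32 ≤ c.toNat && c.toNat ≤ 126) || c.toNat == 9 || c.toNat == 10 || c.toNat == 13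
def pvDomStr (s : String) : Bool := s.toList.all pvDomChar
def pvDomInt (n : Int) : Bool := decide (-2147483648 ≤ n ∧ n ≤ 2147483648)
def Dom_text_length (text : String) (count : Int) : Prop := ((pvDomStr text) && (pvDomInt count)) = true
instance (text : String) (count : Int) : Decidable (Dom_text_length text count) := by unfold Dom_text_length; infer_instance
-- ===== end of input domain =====

-- B replaces A's iterative doubling loop with a closed-form repeat-then-truncate; on the corner
-- len(text)=1, count=2 (D_ below) A returns a 4-character string where B returns the intended 2-character fill.


-- ===== PORT A =====
-- A's 'for i in range(count)' loop: i is unused; the break path returns the truncated text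
def textLengthLoop (l : List Int) (t : List Char) (count : Int) : List Char :=
  match l with
  | [] => t
  | _ :: rest =>
    if (t.length : Int) > count then
      PySem.List.slice t none (some ((t.length : Int) - ((t.length : Int) - count)))
    else textLengthLoop rest (t ++ t) count

def text_length (text : String) (count : Int) : String :=
  if (PySem.Str.len text) ≥ count then
    String.ofList (PySem.List.slice text.toList none (some count))
  else
    String.ofList (textLengthLoop (PySem.List.pyRange 0 count 1) text.toList count)

-- ===== PORT B =====
def text_length_alt (text : String) (count : Int) : String :=
  if (PySem.Str.len text) ≥ count then
    String.ofList (PySem.List.slice text.toList none (some count))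
  else if text.toList = [] then ""
  else
    String.ofList (PySem.List.slice
      (PySem.List.pyRepeat text.toList (PySem.Int.floordiv count (PySem.Str.len text) + 1))
      none (some count))

-- ===== PRECONDITION & SPEC =====
-- On a one-character text with count = 2, A's doubling loop exhausts range(2) without ever hitting
-- its truncation guard and returns the text repeated 4 times; B returns the text repeated twice,
-- the intended fill to exactly count characters.
def D_text_length (text : String) (count : Int) : Prop :=
  text.toList.length = 1 ∧ count = 2
instance (text : String) (count : Int) : Decidable (D_text_length text count) := by
  unfold D_text_length; infer_instance

def Spec_text_length (text : String) (count : Int) (out : String) : Prop :=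
  ¬ D_text_length text count → out = text_length_alt text count
instance (text : String) (count : Int) (out : String) : Decidable (Spec_text_length text count out) := by
  unfold Spec_text_length; infer_instance

def pvDiffWitness_text_length : String × Int := ("a", 2)
def pvDiffWitnessOut_text_length : String × String := ("aaaa", "aa")

-- ===== CLAIM (what is proved, stated in full; the proofs are below) =====
def Claim_unchanged_text_length : Prop := ∀ (text : String) (count : Int), Dom_text_length text count → Spec_text_length text count (text_length text count)
def Claim_changed_text_length : Prop := Dom_text_length (pvDiffWitness_text_length.1) (pvDiffWitness_text_length.2) ∧ D_text_length (pvDiffWitness_text_length.1) (pvDiffWitness_text_length.2) ∧ text_length (pvDiffWitness_text_length.1) (pvDiffWitness_text_length.2) = pvDiffWitnessOut_text_length.1 ∧ text_length_alt (pvDiffWitness_text_length.1) (pvDiffWitness_text_length.2) = pvDiffWitnessOut_text_length.2 ∧ pvDiffWitnessOut_text_length.1 ≠ pvDiffWitnessOut_text_length.2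
def Claim_exact_text_length : Prop := ∀ (text : String) (count : Int), Dom_text_length text count → D_text_length text count → text_length text count ≠ text_length_alt text count

-- ===== LEMMAS AND PROOFS =====

-- m concatenated copies of t (the value of Python's  t * m  for m : Nat)
def repL (m : Nat) (t : List Char) : List Char := (List.replicate m t).flatten

lemma repL_succ (m : Nat) (t : List Char) : repL (m + 1) t = t ++ repL m t := by
  simp [repL, List.replicate_succ]

lemma length_repL (m : Nat) (t : List Char) : (repL m t).length = m * t.length := by
  induction m with
  | zero => simp [repL]
  | succ n ih => rw [repL_succ, List.length_append, ih, Nat.succ_mul]; ring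

lemma repL_add (m n : Nat) (t : List Char) : repL (m + n) t = repL m t ++ repL n t := by
  unfold repL
  rw [List.replicate_add, List.flatten_append]

lemma pyRepeat_eq_repL (t : List Char) (n : Int) :
    PySem.List.pyRepeat t n = repL n.toNat t := rfl

-- prefixes of length k of any two sufficiently long repetitions of t agree
lemma take_repL_eq (t : List Char) (m₁ m₂ k : Nat)
    (h1 : k ≤ m₁ * t.length) (h2 : k ≤ m₂ * t.length) :
    (repL m₁ t).take k = (repL m₂ t).take k := by
  rcases Nat.le_total m₁ m₂ with h | h
  · have hs : repL m₂ t = repL m₁ t ++ repL (m₂ - m₁) t := by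
      rw [← repL_add]; congr 1; omega
    rw [hs, List.take_append_of_le_length (by rw [length_repL]; exact h1)]
  · have hs : repL m₁ t = repL m₂ t ++ repL (m₁ - m₂) t := by
      rw [← repL_add]; congr 1; omega
    rw [hs, List.take_append_of_le_length (by rw [length_repL]; exact h2)]

lemma textLengthLoop_nil_text (l : List Int) (c : Int) (hc : 0 ≤ c) :
    textLengthLoop l [] c = [] := by
  induction l with
  | nil => rfl
  | cons x rest ih =>
    simp only [textLengthLoop, List.length_nil]
    rw [if_neg (by omega)]
    simpa using ih

lemma lt_two_pow_pred (k : Nat) (h : 3 ≤ k) : k < 2 ^ (k - 1) := by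
  induction k with
  | zero => omega
  | succ n ih =>
    rcases Nat.lt_or_ge n 3 with h3 | h3
    · have hn : n = 2 := by omega
      subst hn; decide
    · have h1 := ih h3
      have hn1 : n - 1 + 1 = n := by omega
      have h2 : 2 ^ n = 2 ^ (n - 1) * 2 := by
        conv_lhs => rw [← hn1]
        rw [pow_succ]
      have hg : n + 1 - 1 = n := by omega
      rw [hg]
      omega

-- A's loop, started on a repetition s of t with enough fuel, returns the count-prefix of a repetition
lemma textLengthLoop_spec (t : List Char) (c : Int) (hc : 0 < c) :
    ∀ (n : Nat) (l : List Int) (s : List Char) (m : Nat), 0 < m → s = repL m t →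
      n + 1 ≤ l.length → c < (s.length : Int) * 2 ^ n →
      ∃ M, 0 < M ∧ textLengthLoop l s c = (repL M t).take c.toNat ∧ c.toNat ≤ M * t.length := by
  intro n
  induction n with
  | zero =>
    intro l s m hm hs hl hbound
    match l with
    | x :: rest =>
      simp only [pow_zero, mul_one] at hbound
      refine ⟨m, hm, ?_, ?_⟩
      · simp only [textLengthLoop]
        rw [if_pos hbound]
        have he : (s.length : Int) - ((s.length : Int) - c) = c := by ring
        rw [he, PySem.List.slice_to _ (le_of_lt hc), hs]
      · subst hs; rw [length_repL] at hbound; omega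
  | succ n ih =>
    intro l s m hm hs hl hbound
    match l with
    | x :: rest =>
      simp only [textLengthLoop]
      by_cases hbig : (s.length : Int) > c
      · rw [if_pos hbig]
        refine ⟨m, hm, ?_, ?_⟩
        · have he : (s.length : Int) - ((s.length : Int) - c) = c := by ring
          rw [he, PySem.List.slice_to _ (le_of_lt hc), hs]
        · subst hs; rw [length_repL] at hbig; omega
      · rw [if_neg hbig]
        have hss : s ++ s = repL (m + m) t := by rw [repL_add, hs]
        refine ih rest (s ++ s) (m + m) (by omega) hss (by simpa using hl) ?_
        have hlen : ((s ++ s).length : Int) = 2 * (s.length : Int) := by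
          rw [List.length_append]; push_cast; ring
        rw [hlen]
        calc c < (s.length : Int) * 2 ^ (n + 1) := hbound
          _ = 2 * (s.length : Int) * 2 ^ n := by ring

-- the D_ corner, A's side: the loop on a single character with count = 2 doubles twice
lemma textLengthLoop_single_two (ch : Char) :
    textLengthLoop (PySem.List.pyRange 0 2 1) [ch] 2 = [ch, ch, ch, ch] := by
  rw [PySem.List.pyRange_one_cons (by norm_num),
      PySem.List.pyRange_one_cons (by norm_num),
      PySem.List.pyRange_one_eq_nil (by norm_num)]
  simp [textLengthLoop]

-- the D_ corner, B's side
lemma alt_single_two (ch : Char) (text : String) (h : text.toList = [ch]) :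
    text_length_alt text 2 = String.ofList [ch, ch] := by
  unfold text_length_alt
  rw [if_neg (by simp [PySem.Str.len, h]), if_neg (by simp [h])]
  simp only [PySem.Str.len, h, List.length_cons, List.length_nil]
  norm_num
  rw [PySem.List.slice_to _ (by norm_num)]
  congr 1

-- ===== VERDICT (by name: the statements are the Claim_ definitions above) =====
theorem text_length_spec : Claim_unchanged_text_length := by
  intro text count _ hnD
  show text_length text count = text_length_alt text count
  unfold text_length text_length_alt
  by_cases hge : PySem.Str.len text ≥ count
  · rw [if_pos hge, if_pos hge]
  · rw [if_neg hge, if_neg hge]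
    have hlen : (text.toList.length : Int) < count := by
      simpa [PySem.Str.len] using lt_of_not_ge hge
    by_cases hnil : text.toList = []
    · rw [if_pos hnil, hnil, textLengthLoop_nil_text _ _ (by rw [hnil] at hlen; simp at hlen; omega)]
    · rw [if_neg hnil]
      have ht : 0 < text.toList.length := List.length_pos_iff.mpr hnil
      have hc : 0 < count := by omega
      have hc3 : 3 ≤ count := by
        rcases Int.lt_or_le count 3 with h3 | h3
        · exfalso
          have hl1 : text.toList.length = 1 := by omega
          have hc2 : count = 2 := by omega
          exact hnD ⟨hl1, hc2⟩
        · exact h3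
      obtain ⟨M, hM, hres, hMlen⟩ :=
        textLengthLoop_spec text.toList count hc (count.toNat - 1)
          (PySem.List.pyRange 0 count 1) text.toList 1 one_pos (by simp [repL])
          (by rw [PySem.List.length_pyRange_one]; omega)
          (by
            have h1 : ((count.toNat : Int)) < (2 : Int) ^ (count.toNat - 1) := by
              exact_mod_cast lt_two_pow_pred count.toNat (by omega)
            have h2 : (1 : Int) ≤ (text.toList.length : Int) := by exact_mod_cast ht
            calc count = (count.toNat : Int) := by omega
              _ < 2 ^ (count.toNat - 1) := h1
              _ = 1 * 2 ^ (count.toNat - 1) := (one_mul _).symm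
              _ ≤ (text.toList.length : Int) * 2 ^ (count.toNat - 1) := by
                  apply mul_le_mul_of_nonneg_right h2 (by positivity))
      rw [hres]
      simp only [PySem.Str.len]
      rw [pyRepeat_eq_repL, PySem.List.slice_to _ (le_of_lt hc)]
      congr 1
      apply take_repL_eq _ _ _ _ hMlen
      -- count.toNat ≤ (count // len + 1).toNat * len
      have htI : (0 : Int) < (text.toList.length : Int) := by exact_mod_cast ht
      have hfl := PySem.Int.floordiv_mul_add_mod count (text.toList.length : Int)
      have hml := PySem.Int.mod_lt count htI
      have hmn := PySem.Int.mod_nonneg count htI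
      set q := PySem.Int.floordiv count (text.toList.length : Int) with hq
      have hq0 : 0 ≤ q := by nlinarith
      have key : count < (q + 1) * (text.toList.length : Int) := by nlinarith
      have hcast : (((q + 1).toNat * text.toList.length : Nat) : Int)
          = (q + 1) * (text.toList.length : Int) := by
        push_cast [Int.toNat_of_nonneg (by omega : (0:Int) ≤ q + 1)]
        ring
      apply Int.toNat_le.mpr
      rw [hcast]
      exact le_of_lt key

theorem text_length_changed : Claim_changed_text_length := by
  unfold Claim_changed_text_length; decide

theorem text_length_tight : Claim_exact_text_length := by
  intro text count _ hD
  obtain ⟨h1, h2⟩ := hD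
  subst h2
  obtain ⟨ch, hch⟩ := List.length_eq_one_iff.mp h1
  rw [alt_single_two ch text hch]
  unfold text_length
  rw [if_neg (by simp [PySem.Str.len, hch]), hch, textLengthLoop_single_two]
  intro hEq
  have := congrArg String.toList hEq
  simp at this
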